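-- pv_equiv track=rewrite | github.com/soni-aditya/Data-Structures-using-python | Famous Problems/graph/get_island_from_map.py | get_island_submatrix
-- ===== SOURCE A (Python) =====
-- def get_island_submatrix(matrix, row, col):
--     def dfs(r, c):
--         # Check if the current cell is within bounds and is land
--         if 0 <= r < len(matrix) and 0 <= c < len(matrix[0]) and matrix[r][c] == 1:
--             # Mark the cell as visited by changing its value to 2
--             matrix[r][c] = 2
--             # Recursively explore neighboring land cells
--             for dr, dc in [(1, 0), (-1, 0), (0, 1), (0, -1)]:
--                 dfs(r + dr, c + dc)
--
--     # Start DFS from the clicked cell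
--     dfs(row, col)
--
--     # Find the bounds of the island
--     min_row, max_row, min_col, max_col = len(matrix), 0, len(matrix[0]), 0
--     for r in range(len(matrix)):
--         for c in range(len(matrix[0])):
--             if matrix[r][c] == 2:
--                 min_row = min(min_row, r)
--                 max_row = max(max_row, r)
--                 min_col = min(min_col, c)
--                 max_col = max(max_col, c)
--
--     # Extract the submatrix containing the island
--     island_submatrix = [row[min_col:max_col + 1] for row in matrix[min_row:max_row + 1]]
--
--     return island_submatrix
-- ===== SOURCE B (Python) =====
-- def get_island_submatrix(matrix, row, col):
--     # Iterative flood fill with an explicit stack instead of recursion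
--     # (marks the island in place with 2s, exactly like the original).
--     stack = [(row, col)]
--     while stack:
--         r, c = stack.pop()
--         if 0 <= r < len(matrix) and 0 <= c < len(matrix[0]) and matrix[r][c] == 1:
--             matrix[r][c] = 2
--             stack.extend([(r, c - 1), (r, c + 1), (r - 1, c), (r + 1, c)])
--
--     # Find the bounds of the island
--     min_row, max_row, min_col, max_col = len(matrix), 0, len(matrix[0]), 0
--     for r in range(len(matrix)):
--         for c in range(len(matrix[0])):
--             if matrix[r][c] == 2:
--                 min_row = min(min_row, r)
--                 max_row = max(max_row, r)
--                 min_col = min(min_col, c)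
--                 max_col = max(max_col, c)
--
--     # Extract the submatrix containing the island
--     return [row[min_col:max_col + 1] for row in matrix[min_row:max_row + 1]]
-- ===== Notes on version B (the rewrite author's own statement) =====
-- stated objective: alternative
-- what changed: The recursive dfs flood fill is replaced by an iterative flood fill driven by an explicit stack of cells (pop a cell, mark it, push its four neighbours), which avoids Python recursion; the bounding-box rescan and the final slice are unchanged.
import Mathlib
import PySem

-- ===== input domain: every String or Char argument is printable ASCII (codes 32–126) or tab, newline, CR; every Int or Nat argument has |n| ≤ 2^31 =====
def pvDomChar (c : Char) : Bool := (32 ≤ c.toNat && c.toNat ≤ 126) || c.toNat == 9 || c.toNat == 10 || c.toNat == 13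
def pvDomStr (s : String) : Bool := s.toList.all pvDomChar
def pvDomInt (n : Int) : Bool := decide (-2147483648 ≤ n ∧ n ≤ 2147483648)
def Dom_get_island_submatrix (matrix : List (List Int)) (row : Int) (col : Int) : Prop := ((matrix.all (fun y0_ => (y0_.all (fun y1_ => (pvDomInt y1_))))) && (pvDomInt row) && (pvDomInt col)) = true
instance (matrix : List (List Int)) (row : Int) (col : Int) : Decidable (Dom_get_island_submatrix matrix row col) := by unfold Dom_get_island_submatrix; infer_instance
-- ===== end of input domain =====

-- B replaces A's recursive dfs flood fill with an explicit-stack iterative flood fill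
-- (objective: alternative decomposition; same bounding-box rescan and slice).  Both Python
-- programs mark the island cells of `matrix` in place with 2s in the same way; the
-- equivalence proved here is about the return value.

-- ===== PORT A =====

-- number of 1-cells of the matrix; the termination measure of both flood fills
def pvOnes (m : List (List Int)) : Nat := (m.map (fun r => r.count 1)).sum

-- sum strictly drops when one entry strictly drops (used only for the measure)
theorem pvSum_set_lt (L : List Nat) (i : Nat) (x : Nat) (hi : i < L.length)
    (hx : x < L[i]) : (L.set i x).sum < L.sum := by
  induction L generalizing i with
  | nil => exact absurd hi (Nat.not_lt_zero i)
  | cons a t ih =>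
    cases i with
    | zero => simpa using Nat.add_lt_add_right hx t.sum
    | succ j => simpa using Nat.add_lt_add_left (ih j (Nat.lt_of_succ_lt_succ hi) hx) a

-- arithmetic shapes of the two decreasing steps of pvFlood (cited by its termination proof)
theorem pvFlood_dec1 (a b n : Nat) (h : a < b) :
    5 * a + (n + 1 + 1 + 1 + 1) < 5 * b + (n + 1) := by omega

-- marking a 1-cell with 2 strictly decreases pvOnes (cited by the termination proofs)
theorem pvOnes_mark_lt (m : List (List Int)) (i j : Nat)
    (hval : (m.getD i []).getD j 0 = 1) :
    pvOnes (m.set i ((m.getD i []).set j 2)) < pvOnes m := by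
  have hj : j < (m.getD i []).length := by
    by_contra hjn
    rw [List.getD_eq_getElem?_getD, List.getElem?_eq_none (Nat.le_of_not_lt hjn)] at hval
    exact absurd hval (by decide)
  have hi : i < m.length := by
    by_contra hin
    have hnil : m.getD i [] = [] := by
      rw [List.getD_eq_getElem?_getD, List.getElem?_eq_none (Nat.le_of_not_lt hin)]
      rfl
    rw [hnil] at hj
    exact absurd hj (Nat.not_lt_zero j)
  have hcell : (m.getD i [])[j] = 1 := by
    rw [List.getD_eq_getElem?_getD, List.getElem?_eq_getElem hj] at hval
    exact hval
  have hrow : m.getD i [] = m[i] := by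
    rw [List.getD_eq_getElem?_getD, List.getElem?_eq_getElem hi]
    rfl
  unfold pvOnes
  rw [List.map_set]
  apply pvSum_set_lt _ i _ (by rw [List.length_map]; exact hi)
  rw [List.getElem_map, ← hrow]
  show ((m.getD i []).set j 2).count 1 < (m.getD i []).count 1
  have hmem : (1 : Int) ∈ m.getD i [] := hcell ▸ List.getElem_mem hj
  have hpos : 0 < (m.getD i []).count 1 := List.count_pos_iff.mpr hmem
  have h21 : ((2 : Int) == 1) = false := by decide
  rw [List.count_set hj, hcell, h21]
  simpa using hpos

-- literal port of A's recursive dfs; the subtype carries `pvOnes` non-increase,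
-- which the nested recursion needs for termination
def pvDfsAux (m : List (List Int)) (r c : Int) :
    {m' : List (List Int) // pvOnes m' ≤ pvOnes m} :=
  if h : 0 ≤ r ∧ r < (m.length : Int) ∧ 0 ≤ c ∧ c < (m.headI.length : Int) ∧
      (m.getD r.toNat []).getD c.toNat 0 = 1 then
    let m1 := m.set r.toNat ((m.getD r.toNat []).set c.toNat 2)
    have h1 : pvOnes m1 < pvOnes m := pvOnes_mark_lt m r.toNat c.toNat h.2.2.2.2
    let s1 := pvDfsAux m1 (r + 1) c
    have e1 : pvOnes s1.1 < pvOnes m := lt_of_le_of_lt s1.2 h1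
    let s2 := pvDfsAux s1.1 (r - 1) c
    have e2 : pvOnes s2.1 < pvOnes m := lt_of_le_of_lt s2.2 e1
    let s3 := pvDfsAux s2.1 r (c + 1)
    have e3 : pvOnes s3.1 < pvOnes m := lt_of_le_of_lt s3.2 e2
    let s4 := pvDfsAux s3.1 r (c - 1)
    ⟨s4.1, le_of_lt (lt_of_le_of_lt s4.2 e3)⟩
  else ⟨m, le_refl _⟩
termination_by pvOnes m
decreasing_by
  · exact h1
  · exact e1
  · exact e2
  · exact e3

def pvDfs (m : List (List Int)) (r c : Int) : List (List Int) := (pvDfsAux m r c).1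

def get_island_submatrix (matrix : List (List Int)) (row : Int) (col : Int) : List (List Int) :=
  let M := pvDfs matrix row col
  let st := (PySem.List.pyRange 0 (M.length : Int) 1).foldl (fun st r =>
      (PySem.List.pyRange 0 (M.headI.length : Int) 1).foldl (fun st c =>
        if (M.getD r.toNat []).getD c.toNat 0 = 2 then
          (min st.1 r, max st.2.1 r, min st.2.2.1 c, max st.2.2.2 c)
        else st) st) ((M.length : Int), 0, (M.headI.length : Int), 0)
  (PySem.List.slice M (some st.1) (some (st.2.1 + 1))).map
    (fun rw => PySem.List.slice rw (some st.2.2.1) (some (st.2.2.2 + 1)))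

-- ===== PORT B =====

-- B's while-loop; Python pops from the END of the list and extends with the four
-- neighbours in reverse, so the top of the stack is the HEAD of this Lean list
def pvFlood (h w : Int) (m : List (List Int)) (stack : List (Int × Int)) : List (List Int) :=
  match stack with
  | [] => m
  | (r, c) :: rest =>
    if hg : 0 ≤ r ∧ r < h ∧ 0 ≤ c ∧ c < w ∧ (m.getD r.toNat []).getD c.toNat 0 = 1 then
      pvFlood h w (m.set r.toNat ((m.getD r.toNat []).set c.toNat 2))
        ((r + 1, c) :: (r - 1, c) :: (r, c + 1) :: (r, c - 1) :: rest)
    else pvFlood h w m rest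
termination_by 5 * pvOnes m + stack.length
decreasing_by
  · simp only [List.length_cons]
    exact pvFlood_dec1 _ _ _ (pvOnes_mark_lt m r.toNat c.toNat hg.2.2.2.2)
  · simp only [List.length_cons]
    exact Nat.add_lt_add_left (Nat.lt_succ_self _) _

def get_island_submatrix_alt (matrix : List (List Int)) (row : Int) (col : Int) : List (List Int) :=
  let h : Int := matrix.length
  let w : Int := matrix.headI.length
  let M := pvFlood h w matrix [(row, col)]
  let st := (PySem.List.pyRange 0 h 1).foldl (fun st r =>
      (PySem.List.pyRange 0 w 1).foldl (fun st c =>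
        if (M.getD r.toNat []).getD c.toNat 0 = 2 then
          (min st.1 r, max st.2.1 r, min st.2.2.1 c, max st.2.2.2 c)
        else st) st) (h, 0, w, 0)
  (PySem.List.slice M (some st.1) (some (st.2.1 + 1))).map
    (fun rw => PySem.List.slice rw (some st.2.2.1) (some (st.2.2.2 + 1)))

-- ===== PRECONDITION & SPEC =====
-- Python A raises IndexError on an empty matrix (len(matrix[0])) and, in its rescan,
-- whenever some row is shorter than the first row; on every other input it returns.
def Pre_get_island_submatrix (matrix : List (List Int)) (row : Int) (col : Int) : Prop :=
  matrix ≠ [] ∧ ∀ rw ∈ matrix, matrix.headI.length ≤ rw.length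
instance (matrix : List (List Int)) (row : Int) (col : Int) : Decidable (Pre_get_island_submatrix matrix row col) := by unfold Pre_get_island_submatrix; infer_instance

def pvWitness_get_island_submatrix : List (List Int) × Int × Int := ([[1, 1, 0], [0, 1, 0]], 0, 0)

def Spec_get_island_submatrix (matrix : List (List Int)) (row : Int) (col : Int) (out : List (List Int)) : Prop := out = get_island_submatrix_alt matrix row col
instance (matrix : List (List Int)) (row : Int) (col : Int) (out : List (List Int)) : Decidable (Spec_get_island_submatrix matrix row col out) := by unfold Spec_get_island_submatrix; infer_instance

-- ===== CLAIM (what is proved, stated in full; the proofs are below) =====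
def Claim_equal_get_island_submatrix : Prop := ∀ (matrix : List (List Int)) (row : Int) (col : Int), Dom_get_island_submatrix matrix row col → Pre_get_island_submatrix matrix row col → Spec_get_island_submatrix matrix row col (get_island_submatrix matrix row col)

-- ===== LEMMAS AND PROOFS =====

-- one-step unfolding of pvDfs in terms of itself
theorem pvDfs_eq (m : List (List Int)) (r c : Int) :
    pvDfs m r c =
      if 0 ≤ r ∧ r < (m.length : Int) ∧ 0 ≤ c ∧ c < (m.headI.length : Int) ∧
          (m.getD r.toNat []).getD c.toNat 0 = 1 then
        pvDfs (pvDfs (pvDfs (pvDfs (m.set r.toNat ((m.getD r.toNat []).set c.toNat 2))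
          (r + 1) c) (r - 1) c) r (c + 1)) r (c - 1)
      else m := by
  rw [pvDfs, pvDfsAux]
  split
  · rfl
  · rfl

theorem pvDfs_ones_le (m : List (List Int)) (r c : Int) : pvOnes (pvDfs m r c) ≤ pvOnes m :=
  (pvDfsAux m r c).2

-- marking preserves the matrix's dimensions
theorem pvMark_dims (m : List (List Int)) (i j : Nat) :
    (m.set i ((m.getD i []).set j 2)).length = m.length ∧
    (m.set i ((m.getD i []).set j 2)).headI.length = m.headI.length := by
  constructor
  · simp
  · cases m with
    | nil => simp
    | cons a t =>
      cases i with
      | zero => simp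
      | succ k => simp

-- pvDfs preserves the matrix's dimensions
theorem pvDfs_dims (n : Nat) : ∀ (m : List (List Int)), pvOnes m ≤ n → ∀ (r c : Int),
    (pvDfs m r c).length = m.length ∧ (pvDfs m r c).headI.length = m.headI.length := by
  induction n with
  | zero =>
    intro m hm r c
    rw [pvDfs_eq]
    split
    · rename_i hgd
      exact absurd (Nat.lt_of_lt_of_le (pvOnes_mark_lt m r.toNat c.toNat hgd.2.2.2.2) hm)
        (Nat.not_lt_zero _)
    · exact ⟨rfl, rfl⟩
  | succ k ih =>
    intro m hm r c
    rw [pvDfs_eq]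
    split
    · rename_i hgd
      have h1 := pvOnes_mark_lt m r.toNat c.toNat hgd.2.2.2.2
      set m1 := m.set r.toNat ((m.getD r.toNat []).set c.toNat 2) with hm1
      have d1 := pvMark_dims m r.toNat c.toNat
      have b1 : pvOnes m1 ≤ k := by omega
      have d2 := ih m1 b1 (r + 1) c
      have b2 : pvOnes (pvDfs m1 (r + 1) c) ≤ k := le_trans (pvDfs_ones_le _ _ _) b1
      have d3 := ih _ b2 (r - 1) c
      have b3 : pvOnes (pvDfs (pvDfs m1 (r + 1) c) (r - 1) c) ≤ k :=
        le_trans (pvDfs_ones_le _ _ _) b2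
      have d4 := ih _ b3 r (c + 1)
      have b4 : pvOnes (pvDfs (pvDfs (pvDfs m1 (r + 1) c) (r - 1) c) r (c + 1)) ≤ k :=
        le_trans (pvDfs_ones_le _ _ _) b3
      have d5 := ih _ b4 r (c - 1)
      exact ⟨by rw [d5.1, d4.1, d3.1, d2.1, d1.1], by rw [d5.2, d4.2, d3.2, d2.2, d1.2]⟩
    · exact ⟨rfl, rfl⟩

-- popping one cell off B's stack performs exactly A's dfs from that cell
theorem pvFlood_cons (n : Nat) : ∀ (m : List (List Int)), pvOnes m ≤ n →
    ∀ (h w : Int), (m.length : Int) = h → (m.headI.length : Int) = w →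
    ∀ (r c : Int) (s : List (Int × Int)),
    pvFlood h w m ((r, c) :: s) = pvFlood h w (pvDfs m r c) s := by
  induction n with
  | zero =>
    intro m hm h w hh hw r c s
    rw [pvFlood, pvDfs_eq]
    subst hh hw
    split
    · rename_i hgd
      exact absurd (Nat.lt_of_lt_of_le (pvOnes_mark_lt m r.toNat c.toNat hgd.2.2.2.2) hm)
        (Nat.not_lt_zero _)
    all_goals rfl
  | succ k ih =>
    intro m hm h w hh hw r c s
    rw [pvFlood, pvDfs_eq]
    subst hh hw
    split
    · rename_i hgd
      have h1 := pvOnes_mark_lt m r.toNat c.toNat hgd.2.2.2.2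
      set m1 := m.set r.toNat ((m.getD r.toNat []).set c.toNat 2) with hm1
      have d1 := pvMark_dims m r.toNat c.toNat
      have b1 : pvOnes m1 ≤ k := by omega
      have e1 : (m1.length : Int) = (m.length : Int) := by rw [d1.1]
      have f1 : (m1.headI.length : Int) = (m.headI.length : Int) := by rw [d1.2]
      have dd1 := pvDfs_dims (pvOnes m1) m1 le_rfl (r + 1) c
      have dd2 := pvDfs_dims (pvOnes (pvDfs m1 (r + 1) c)) _ le_rfl (r - 1) c
      have dd3 := pvDfs_dims (pvOnes (pvDfs (pvDfs m1 (r + 1) c) (r - 1) c)) _ le_rfl r (c + 1)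
      have b2 : pvOnes (pvDfs m1 (r + 1) c) ≤ k := le_trans (pvDfs_ones_le _ _ _) b1
      have b3 : pvOnes (pvDfs (pvDfs m1 (r + 1) c) (r - 1) c) ≤ k :=
        le_trans (pvDfs_ones_le _ _ _) b2
      have b4 : pvOnes (pvDfs (pvDfs (pvDfs m1 (r + 1) c) (r - 1) c) r (c + 1)) ≤ k :=
        le_trans (pvDfs_ones_le _ _ _) b3
      rw [ih m1 b1 _ _ e1 f1 (r + 1) c]
      rw [ih _ b2 _ _ (by rw [dd1.1, e1]) (by rw [dd1.2, f1]) (r - 1) c]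
      rw [ih _ b3 _ _ (by rw [dd2.1, dd1.1, e1]) (by rw [dd2.2, dd1.2, f1]) r (c + 1)]
      rw [ih _ b4 _ _ (by rw [dd3.1, dd2.1, dd1.1, e1]) (by rw [dd3.2, dd2.2, dd1.2, f1]) r (c - 1)]
    all_goals rfl

-- B's whole flood fill equals A's dfs started at the same cell
theorem pvFlood_eq_pvDfs (m : List (List Int)) (r c : Int) :
    pvFlood (m.length : Int) (m.headI.length : Int) m [(r, c)] = pvDfs m r c := by
  rw [pvFlood_cons (pvOnes m) m le_rfl _ _ rfl rfl r c []]
  rw [pvFlood]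

-- ===== VERDICT (by name: the statement is the Claim_ definition above) =====
theorem get_island_submatrix_spec : Claim_equal_get_island_submatrix := by
  intro matrix row col _ _
  unfold Spec_get_island_submatrix
  have d := pvDfs_dims (pvOnes matrix) matrix le_rfl row col
  simp only [get_island_submatrix, get_island_submatrix_alt, pvFlood_eq_pvDfs, d.1, d.2]
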